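-- pv_equiv track=rewrite | github.com/druckhead/EduLabs-FullStack-Course | Lessons/Lesson_9/src/Homework/C4_ebook/ebook.py | _find_pg_num
-- ===== SOURCE A (Python) =====
-- def _find_pg_num(bookmark_name: str, bookmarks_dict: dict[int, list[str]]) -> int:
--     """
--     Returns the page num of the bookmark according to its name\n
--     :param bookmark_name: str
--     :param bookmarks_dict: list[str]
--     :return: int
--     """
--     bookmarks: list[str] = [name for list_names in bookmarks_dict.values() for name in list_names]
--     if bookmark_name not in bookmarks:
--         raise KeyError
--     page_num = -1
--     flag = False
--     for pg_num, name_list in bookmarks_dict.items():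
--         if flag:
--             break
--         for curr_name in name_list:
--             if curr_name == bookmark_name:
--                 page_num = pg_num
--                 flag = True
--                 break
--     return page_num
-- ===== SOURCE B (Python) =====
-- def _find_pg_num(bookmark_name: str, bookmarks_dict: dict[int, list[str]]) -> int:
--     # Build an inverted index name -> first page containing it, then one dict lookup.
--     index: dict[str, int] = {}
--     for pg_num, name_list in bookmarks_dict.items():
--         for name in name_list:
--             index.setdefault(name, pg_num)
--     return index[bookmark_name]
-- ===== Notes on version B (the rewrite author's own statement) =====
-- stated objective: alternative
-- what changed: B builds an inverted index (name -> first page, via dict.setdefault) in one pass and answers with a single dict lookup, replacing A's flatten-all-names membership pre-pass and its flag/sentinel nested search loop.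
import Mathlib
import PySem

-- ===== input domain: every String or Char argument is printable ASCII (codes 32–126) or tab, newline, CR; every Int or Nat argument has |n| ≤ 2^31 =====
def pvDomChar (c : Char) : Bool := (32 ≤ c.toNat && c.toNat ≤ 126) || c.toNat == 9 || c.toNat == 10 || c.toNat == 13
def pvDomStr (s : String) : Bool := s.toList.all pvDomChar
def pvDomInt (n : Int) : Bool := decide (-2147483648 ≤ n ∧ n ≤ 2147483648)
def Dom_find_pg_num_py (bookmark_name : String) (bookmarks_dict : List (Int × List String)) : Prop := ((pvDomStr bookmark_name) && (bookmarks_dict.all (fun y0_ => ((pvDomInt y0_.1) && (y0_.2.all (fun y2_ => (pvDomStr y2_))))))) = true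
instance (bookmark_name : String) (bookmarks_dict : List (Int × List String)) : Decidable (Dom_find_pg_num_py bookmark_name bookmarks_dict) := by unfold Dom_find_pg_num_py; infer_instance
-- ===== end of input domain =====

-- B builds an inverted index (name -> first page, via setdefault) and answers with one dict
-- lookup, replacing A's flatten+membership pre-pass and flag/sentinel nested search loop.

-- ===== PORT A =====
-- inner 'for curr_name in name_list: if curr_name == bookmark_name: … break' — whether a match was hit
def pvAInner (bookmark_name : String) : List String → Bool
  | [] => false
  | curr_name :: rest => if curr_name == bookmark_name then true else pvAInner bookmark_name rest

-- outer 'for pg_num, name_list in bookmarks_dict.items(): if flag: break; …' with state (page_num, flag)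
def pvAOuter (bookmark_name : String) : List (Int × List String) → Int → Bool → Int
  | [], page_num, _flag => page_num
  | (pg_num, name_list) :: rest, page_num, flag =>
      if flag then page_num
      else if pvAInner bookmark_name name_list then pvAOuter bookmark_name rest pg_num true
      else pvAOuter bookmark_name rest page_num flag

def find_pg_num_py (bookmark_name : String) (bookmarks_dict : List (Int × List String)) : Int :=
  let bookmarks : List String := bookmarks_dict.flatMap (fun p => p.2)
  if bookmark_name ∈ bookmarks then pvAOuter bookmark_name bookmarks_dict (-1) false
  else -1  -- Python raises KeyError here; excluded by Pre_find_pg_num_py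

-- ===== PORT B =====
-- 'index = {}; for pg_num, name_list in …: for name in name_list: index.setdefault(name, pg_num)'
def pvBIndex (bookmarks_dict : List (Int × List String)) : PySem.Dict String Int :=
  bookmarks_dict.foldl
    (fun index p => p.2.foldl (fun index name => index.setdefault name p.1) index)
    PySem.Dict.empty

def find_pg_num_py_alt (bookmark_name : String) (bookmarks_dict : List (Int × List String)) : Int :=
  ((pvBIndex bookmarks_dict).get? bookmark_name).getD (-1)
  -- Python's 'index[bookmark_name]' raises KeyError on none; excluded by Pre_find_pg_num_py

-- ===== PRECONDITION & SPEC =====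
-- Both A and B raise a KeyError when the name occurs in no page's list; Pre_ excludes exactly
-- those inputs: the name must occur in some list.
def Pre_find_pg_num_py (bookmark_name : String) (bookmarks_dict : List (Int × List String)) : Prop :=
  ∃ p ∈ bookmarks_dict, bookmark_name ∈ p.2
instance (bookmark_name : String) (bookmarks_dict : List (Int × List String)) : Decidable (Pre_find_pg_num_py bookmark_name bookmarks_dict) := by unfold Pre_find_pg_num_py; infer_instance

def pvWitness_find_pg_num_py : String × (List (Int × List String)) := ("a", [(1, ["b", "a"]), (2, ["a"])])

def Spec_find_pg_num_py (bookmark_name : String) (bookmarks_dict : List (Int × List String)) (out : Int) : Prop := out = find_pg_num_py_alt bookmark_name bookmarks_dict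
instance (bookmark_name : String) (bookmarks_dict : List (Int × List String)) (out : Int) : Decidable (Spec_find_pg_num_py bookmark_name bookmarks_dict out) := by unfold Spec_find_pg_num_py; infer_instance

-- ===== CLAIM =====
def Claim_equal_find_pg_num_py : Prop := ∀ (bookmark_name : String) (bookmarks_dict : List (Int × List String)), Dom_find_pg_num_py bookmark_name bookmarks_dict → Pre_find_pg_num_py bookmark_name bookmarks_dict → Spec_find_pg_num_py bookmark_name bookmarks_dict (find_pg_num_py bookmark_name bookmarks_dict)

-- ===== LEMMAS AND PROOFS =====
-- proof-only helper: the first page whose list contains the name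
def pvFirst? (nm : String) : List (Int × List String) → Option Int
  | [] => none
  | (pg, ns) :: rest => if nm ∈ ns then some pg else pvFirst? nm rest

theorem pvAInner_eq_mem (n : String) (l : List String) : pvAInner n l = decide (n ∈ l) := by
  induction l with
  | nil => simp [pvAInner]
  | cons c rest ih =>
      by_cases h : c = n
      · simp [pvAInner, h]
      · simp [pvAInner, h, ih, Ne.symm h]

theorem pvAOuter_flag_true (n : String) (l : List (Int × List String)) (pg : Int) :
    pvAOuter n l pg true = pg := by
  cases l with
  | nil => rfl
  | cons p rest => cases p; simp [pvAOuter]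

theorem pvAOuter_eq_first (n : String) (l : List (Int × List String)) :
    pvAOuter n l (-1) false = (pvFirst? n l).getD (-1) := by
  induction l with
  | nil => rfl
  | cons p rest ih =>
      cases p with
      | mk pg names =>
        by_cases h : n ∈ names
        · simp [pvAOuter, pvFirst?, pvAInner_eq_mem, h, pvAOuter_flag_true]
        · simp [pvAOuter, pvFirst?, pvAInner_eq_mem, h, ih]

theorem pvInnerFold_get? (nm : String) (ns : List String) (pg : Int)
    (acc : PySem.Dict String Int) :
    ((ns.foldl (fun index name => index.setdefault name pg) acc).get? nm) =
      if (acc.get? nm).isSome then acc.get? nm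
      else if nm ∈ ns then some pg else none := by
  induction ns generalizing acc with
  | nil => simp
  | cons c rest ih =>
      rw [List.foldl_cons, ih]
      by_cases h : nm = c
      · subst h
        rw [PySem.Dict.get?_setdefault_self]
        cases hx : acc.get? nm with
        | none => simp
        | some v => simp
      · rw [PySem.Dict.get?_setdefault_of_ne acc pg h]
        simp [h]

theorem pvBIndexGo_get? (nm : String) (l : List (Int × List String))
    (acc : PySem.Dict String Int) :
    ((l.foldl (fun index p => p.2.foldl (fun index name => index.setdefault name p.1) index) acc).get? nm) =
      if (acc.get? nm).isSome then acc.get? nm else pvFirst? nm l := by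
  induction l generalizing acc with
  | nil => simp [pvFirst?]
  | cons p rest ih =>
      rw [List.foldl_cons, ih, pvInnerFold_get?]
      cases hx : acc.get? nm with
      | some v => simp
      | none =>
        by_cases h : nm ∈ p.2 <;> simp [h, pvFirst?]

theorem pvBIndex_get? (nm : String) (l : List (Int × List String)) :
    (pvBIndex l).get? nm = pvFirst? nm l := by
  rw [pvBIndex, pvBIndexGo_get?]
  simp

-- ===== VERDICT =====
theorem find_pg_num_py_spec : Claim_equal_find_pg_num_py := by
  intro n d _ hpre
  unfold Spec_find_pg_num_py find_pg_num_py find_pg_num_py_alt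
  obtain ⟨p, hp, hn⟩ := hpre
  have hmem : n ∈ d.flatMap (fun p => p.2) := List.mem_flatMap.mpr ⟨p, hp, hn⟩
  simp [hmem, pvAOuter_eq_first, pvBIndex_get?]
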